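-- pv_equiv track=rewrite | github.com/Oleksandr-Uvarov/coursematerial_2425 | 09-lists/11-assignment-matching-brackets/student.py | matching_brackets
-- ===== SOURCE A (Python) =====
-- def matching_brackets(string):
--     count_left_round = 0
--     count_left_curly = 0
--     count_left_square = 0
--     count_right_round = 0
--     count_right_curly = 0
--     count_right_square = 0
--
--     for i in range(0, len(string) - 1):
--         if string[i] == "(" and (string[i+1] == "}" or string[i+1] == "]"):
--             return False
--         elif string[i] == "{" and (string[i+1] == ")" or string[i+1] == "]"):
--             return False
--         elif string[i] == "[" and (string[i+1] == "}" or string[i+1] == ")"):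
--             return False
--
--     for char in string:
--         if count_right_round > count_left_round or count_right_curly > count_left_curly or count_right_square > count_left_square:
--             return False
--         if char == "(":
--             count_left_round += 1
--         if char == "{":
--             count_left_curly += 1
--         if char == "[":
--             count_left_square+= 1
--         if char == ")":
--             count_right_round += 1
--         if char == "}":
--             count_right_curly += 1
--         if char == "]":
--             count_right_square += 1
--
--
--     if count_left_round != count_right_round or count_left_curly != count_right_curly or count_left_square != count_right_square:
--         return False
--     return True
-- ===== SOURCE B (Python) =====
-- FORBIDDEN = {("(", "}"), ("(", "]"), ("{", ")"), ("{", "]"), ("[", "}"), ("[", ")")}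
--
-- def matching_brackets(string):
--     if any(pair in FORBIDDEN for pair in zip(string, string[1:])):
--         return False
--     return all(
--         string[:i].count(c) <= string[:i].count(o)
--         for i in range(len(string))
--         for o, c in ("()", "{}", "[]")
--     ) and all(string.count(o) == string.count(c) for o, c in ("()", "{}", "[]"))
-- ===== Notes on version B (the rewrite author's own statement) =====
-- stated objective: alternative
-- what changed: B replaces A's imperative two loops with six running counters and early returns by a declarative formulation: a zip-of-adjacent-pairs membership test against a set of forbidden pairs, plus all(...) comprehensions comparing close/open counts on every prefix slice and on the whole string via str.count, with no running state at all.
import Mathlib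
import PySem

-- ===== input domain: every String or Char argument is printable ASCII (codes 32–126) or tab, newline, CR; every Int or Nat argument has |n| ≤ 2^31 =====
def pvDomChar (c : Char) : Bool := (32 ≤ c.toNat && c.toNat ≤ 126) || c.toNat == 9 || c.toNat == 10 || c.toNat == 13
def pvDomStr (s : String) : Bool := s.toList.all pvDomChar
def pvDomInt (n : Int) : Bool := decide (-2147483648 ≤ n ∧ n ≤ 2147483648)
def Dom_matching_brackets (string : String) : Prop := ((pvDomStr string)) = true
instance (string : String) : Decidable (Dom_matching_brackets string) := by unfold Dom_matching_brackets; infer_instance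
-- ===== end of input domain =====

-- B replaces A's imperative two loops with six running counters by a declarative check:
-- a zip-pairs adjacency test plus prefix-count comparisons (count over slices); objective:
-- alternative (declarative formulation; O(n^2) where A is O(n)).


-- ===== PORT A =====
-- first loop of A: for i in range(len-1), forbidden adjacent (open, mismatched close) pairs
def mbAdj : List Char → Bool
  | c1 :: rest2@(c2 :: _) =>
    if c1 = '(' ∧ (c2 = '}' ∨ c2 = ']') then false
    else if c1 = '{' ∧ (c2 = ')' ∨ c2 = ']') then false
    else if c1 = '[' ∧ (c2 = '}' ∨ c2 = ')') then false
    else mbAdj rest2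
  | _ => true

-- second loop of A: six counters, prefix check before each char, final equality check
def mbCount : List Char → Int → Int → Int → Int → Int → Int → Bool
  | [], lr, lc, ls, rr, rc, rs =>
    if lr ≠ rr ∨ lc ≠ rc ∨ ls ≠ rs then false else true
  | c :: rest, lr, lc, ls, rr, rc, rs =>
    if rr > lr ∨ rc > lc ∨ rs > ls then false
    else
      mbCount rest
        (if c = '(' then lr + 1 else lr)
        (if c = '{' then lc + 1 else lc)
        (if c = '[' then ls + 1 else ls)
        (if c = ')' then rr + 1 else rr)
        (if c = '}' then rc + 1 else rc)
        (if c = ']' then rs + 1 else rs)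

def matching_brackets (string : String) : Bool :=
  if mbAdj string.toList then mbCount string.toList 0 0 0 0 0 0 else false

-- ===== PORT B =====
-- the module constant FORBIDDEN of Source B (set of pairs; membership test = List.contains)
def mbForbidden : List (Char × Char) :=
  [('(', '}'), ('(', ']'), ('{', ')'), ('{', ']'), ('[', '}'), ('[', ')')]

-- the three (open, close) pairs Source B unpacks from "()", "{}", "[]"
def mbPairs : List (Char × Char) := [('(', ')'), ('{', '}'), ('[', ']')]

-- Source B: zip(string, string[1:]) adjacency test, then two declarative all(...) checks
-- (string[:i] with 0 ≤ i ≤ len is exactly List.take i on the character list)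
def matching_brackets_alt (string : String) : Bool :=
  if ((string.toList).zip (string.toList).tail).any (fun pair => mbForbidden.contains pair)
  then false
  else
    ((List.range string.toList.length).all (fun i =>
        mbPairs.all (fun oc =>
          decide ((string.toList.take i).count oc.2 ≤ (string.toList.take i).count oc.1))))
    && mbPairs.all (fun oc => decide (string.toList.count oc.1 = string.toList.count oc.2))

-- ===== PRECONDITION & SPEC =====
def Spec_matching_brackets (string : String) (out : Bool) : Prop := out = matching_brackets_alt string
instance (string : String) (out : Bool) : Decidable (Spec_matching_brackets string out) := by unfold Spec_matching_brackets; infer_instance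

-- ===== CLAIM (what is proved, stated in full; the proofs are below) =====
def Claim_equal_matching_brackets : Prop := ∀ (string : String), Dom_matching_brackets string → Spec_matching_brackets string (matching_brackets string)

-- ===== LEMMAS AND PROOFS =====

-- A's adjacency loop equals B's zip-pairs membership test
theorem mbAdj_eq_zip (cs : List Char) :
    mbAdj cs = !((cs.zip cs.tail).any (fun pair => mbForbidden.contains pair)) := by
  induction cs with
  | nil => simp [mbAdj]
  | cons c1 rest ih =>
    cases rest with
    | nil => simp [mbAdj]
    | cons c2 r =>
      have hz : ((c1 :: c2 :: r).zip (c1 :: c2 :: r).tail) =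
          (c1, c2) :: ((c2 :: r).zip (c2 :: r).tail) := by simp [List.zip]
      rw [hz]
      simp only [List.any_cons, Bool.not_or]
      rw [← ih]
      have hcontains : (mbForbidden.contains (c1, c2)) =
          decide ((c1 = '(' ∧ (c2 = '}' ∨ c2 = ']')) ∨ (c1 = '{' ∧ (c2 = ')' ∨ c2 = ']')) ∨
            (c1 = '[' ∧ (c2 = '}' ∨ c2 = ')'))) := by
        simp only [mbForbidden, List.contains_cons, List.contains_nil, Bool.or_false]
        rw [Bool.eq_iff_iff]
        simp only [Bool.or_eq_true, beq_iff_eq, Prod.mk.injEq, decide_eq_true_eq]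
        tauto
      rw [hcontains]
      by_cases h1 : c1 = '(' ∧ (c2 = '}' ∨ c2 = ']')
      · simp [mbAdj, h1]
      · by_cases h2 : c1 = '{' ∧ (c2 = ')' ∨ c2 = ']')
        · simp [mbAdj, h2]
        · by_cases h3 : c1 = '[' ∧ (c2 = '}' ∨ c2 = ')')
          · simp [mbAdj, h3]
          · simp [mbAdj, h1, h2, h3]

-- A's counting loop equals the declarative prefix/total condition, generalised over offsets
theorem mbCount_eq (cs : List Char) (lr lc ls rr rc rs : Int) :
    mbCount cs lr lc ls rr rc rs =
      (((List.range cs.length).all (fun i =>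
          decide (rr + (cs.take i).count ')' ≤ lr + (cs.take i).count '(') &&
          decide (rc + (cs.take i).count '}' ≤ lc + (cs.take i).count '{') &&
          decide (rs + (cs.take i).count ']' ≤ ls + (cs.take i).count '[')))
       && (decide (lr + (cs.count '(' : Int) = rr + cs.count ')') &&
           decide (lc + (cs.count '{' : Int) = rc + cs.count '}') &&
           decide (ls + (cs.count '[' : Int) = rs + cs.count ']'))) := by
  induction cs generalizing lr lc ls rr rc rs with
  | nil =>
    simp only [mbCount, List.length_nil, List.range_zero, List.all_nil, List.count_nil,
      Bool.true_and]
    rw [Bool.eq_iff_iff]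
    split_ifs with h
    · simp only [false_iff, Bool.and_eq_true, decide_eq_true_eq]
      push_cast
      omega
    · simp only [Bool.and_eq_true, decide_eq_true_eq, true_iff]
      push_cast
      omega
  | cons c rest ih =>
    have hL : mbCount (c :: rest) lr lc ls rr rc rs =
        if rr > lr ∨ rc > lc ∨ rs > ls then false
        else mbCount rest
          (if c = '(' then lr + 1 else lr)
          (if c = '{' then lc + 1 else lc)
          (if c = '[' then ls + 1 else ls)
          (if c = ')' then rr + 1 else rr)
          (if c = '}' then rc + 1 else rc)
          (if c = ']' then rs + 1 else rs) := rfl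
    rw [hL]
    have hrange : List.range (c :: rest).length = 0 :: (List.range rest.length).map (· + 1) := by
      simp [List.range_succ_eq_map]
    rw [hrange, List.all_cons, List.all_map]
    simp only [Function.comp_def, List.take_zero, List.count_nil, List.take_succ_cons,
      List.count_cons, beq_iff_eq]
    by_cases hguard : rr > lr ∨ rc > lc ∨ rs > ls
    · rw [if_pos hguard, Bool.eq_iff_iff]
      simp only [Bool.false_eq_true, false_iff, Bool.and_eq_true, List.all_eq_true,
        List.mem_range, decide_eq_true_eq]
      push_cast
      rintro ⟨⟨⟨⟨h1, h2⟩, h3⟩, -⟩, -⟩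
      omega
    · rw [if_neg hguard, ih, Bool.eq_iff_iff]
      simp only [Bool.and_eq_true, List.all_eq_true, List.mem_range, decide_eq_true_eq]
      push_cast
      constructor
      · rintro ⟨hall, htot⟩
        refine ⟨⟨?_, fun x hx => ?_⟩, ?_⟩
        · refine ⟨⟨?_, ?_⟩, ?_⟩ <;> omega
        · obtain ⟨⟨g1, g2⟩, g3⟩ := hall x hx
          refine ⟨⟨?_, ?_⟩, ?_⟩
          · split_ifs at g1 ⊢ <;> omega
          · split_ifs at g2 ⊢ <;> omega
          · split_ifs at g3 ⊢ <;> omega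
        · obtain ⟨⟨t1, t2⟩, t3⟩ := htot
          refine ⟨⟨?_, ?_⟩, ?_⟩
          · split_ifs at t1 ⊢ <;> omega
          · split_ifs at t2 ⊢ <;> omega
          · split_ifs at t3 ⊢ <;> omega
      · rintro ⟨⟨-, hall⟩, htot⟩
        constructor
        · intro x hx
          obtain ⟨⟨g1, g2⟩, g3⟩ := hall x hx
          refine ⟨⟨?_, ?_⟩, ?_⟩
          · split_ifs at g1 ⊢ <;> omega
          · split_ifs at g2 ⊢ <;> omega
          · split_ifs at g3 ⊢ <;> omega
        · obtain ⟨⟨t1, t2⟩, t3⟩ := htot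
          refine ⟨⟨?_, ?_⟩, ?_⟩
          · split_ifs at t1 ⊢ <;> omega
          · split_ifs at t2 ⊢ <;> omega
          · split_ifs at t3 ⊢ <;> omega

-- ===== VERDICT (by name: the statement is the Claim_ definition above) =====
theorem matching_brackets_spec : Claim_equal_matching_brackets := by
  intro s _
  unfold Spec_matching_brackets matching_brackets matching_brackets_alt
  rw [mbAdj_eq_zip]
  by_cases h : ((s.toList).zip (s.toList).tail).any (fun pair => mbForbidden.contains pair) = true
  · rw [h]
    simp
  · rw [Bool.not_eq_true] at h
    rw [h]
    simp only [Bool.not_false, if_true, if_neg (by simp : ¬ (false = true))]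
    rw [mbCount_eq]
    simp only [mbPairs, List.all_cons, List.all_nil, Bool.and_true]
    rw [Bool.eq_iff_iff]
    simp only [Bool.and_eq_true, List.all_eq_true, List.mem_range, decide_eq_true_eq]
    constructor
    · rintro ⟨hall, htot⟩
      refine ⟨fun i hi => ?_, ?_⟩
      · obtain ⟨⟨a1, a2⟩, a3⟩ := hall i hi
        exact ⟨by omega, by omega, by omega⟩
      · obtain ⟨⟨a1, a2⟩, a3⟩ := htot
        exact ⟨by omega, by omega, by omega⟩
    · rintro ⟨hall, htot⟩
      refine ⟨fun i hi => ?_, ?_⟩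
      · obtain ⟨a1, a2, a3⟩ := hall i hi
        exact ⟨⟨by omega, by omega⟩, by omega⟩
      · obtain ⟨a1, a2, a3⟩ := htot
        exact ⟨⟨by omega, by omega⟩, by omega⟩
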